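-- pv_equiv track=rewrite | github.com/ed4wg/assemblyline-service-synapse | synapse/synapse_result_helper.py | _leaf_tags
-- ===== SOURCE A (Python) =====
-- def _leaf_tags(syn_tagsd: dict[str, list]) -> list[tuple]:
--     """Get the leaf tags from the Synapse tags dict.
--
--     Note: This helper function was sourced from the Synapse source code and adapted.
--
--     Args:
--         syn_tagsd (dict[str, list]): tags dict from a Synapse packed node.
--             {'rep': [None, None], 'rep.vendorx': [None, None]}
--
--     Returns:
--         list[tuple]: list of only the leaf tags. For the example arg, it would just return:
--             [('rep.vendorx', [None, None]),]
--     """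
--     retn: list[tuple] = []
--
--     if not syn_tagsd:
--         return retn
--
--     # brute force rather than build a tree.  faster in small sets.
--     for _, tag, valu in sorted([(len(t), t, v) for (t, v) in syn_tagsd.items()], reverse=True):
--
--         look = tag + "."
--         if any(r.startswith(look) for (r, _) in retn):
--             continue
--
--         retn.append((tag, valu))
--
--     return retn
-- ===== SOURCE B (Python) =====
-- def _leaf_tags(syn_tagsd: dict[str, list]) -> list[tuple]:
--     """Leaf tags = tags no other tag extends through a '.' boundary.
--
--     Filter every tag against the full key set (no sort-then-scan against the
--     growing result), then sort only the surviving leaves descending.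
--     """
--     keys = list(syn_tagsd)
--     leaves = [(t, v) for (t, v) in syn_tagsd.items()
--               if not any(r.startswith(t + ".") for r in keys)]
--     leaves.sort(key=lambda tv: (len(tv[0]), tv[0]), reverse=True)
--     return leaves
-- ===== Notes on version B (the rewrite author's own statement) =====
-- stated objective: simpler
-- what changed: A sorts all tags descending and then scans them, testing each tag with startswith against the growing result list; B instead filters every tag directly against the full key set (a tag is a leaf iff no key extends it through a '.') and sorts only the surviving leaves, eliminating the accumulator-dependent scan.
import Mathlib
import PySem

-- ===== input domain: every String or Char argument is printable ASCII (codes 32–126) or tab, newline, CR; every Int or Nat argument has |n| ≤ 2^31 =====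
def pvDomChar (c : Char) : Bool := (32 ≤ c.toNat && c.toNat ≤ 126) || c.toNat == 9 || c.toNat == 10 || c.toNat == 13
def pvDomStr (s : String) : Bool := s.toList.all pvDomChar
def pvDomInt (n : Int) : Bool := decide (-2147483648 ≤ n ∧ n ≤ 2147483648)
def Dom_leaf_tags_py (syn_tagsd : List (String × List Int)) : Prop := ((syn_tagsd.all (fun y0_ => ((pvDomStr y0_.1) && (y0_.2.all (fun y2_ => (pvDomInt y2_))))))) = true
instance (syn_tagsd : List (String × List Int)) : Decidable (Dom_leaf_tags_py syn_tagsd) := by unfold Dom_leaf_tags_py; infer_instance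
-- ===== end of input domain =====

-- B replaces A's descending sort followed by a scan against the growing result with a direct
-- filter of every tag against the full key set, sorting only the surviving leaves (simpler; not faster:
-- B's inner scan runs over all keys where A's runs over the kept leaves only).

-- ===== PORT A =====
-- Python's `sorted([(len(t), t, v) ...], reverse=True)` is ported as sorted2 with key components
-- (len t, t): the v component of the decorated triple can only be compared when two tags tie on
-- (len, name), i.e. are equal — impossible for the keys of a dict.
def leaf_tags_py (syn_tagsd : List (String × List Int)) : List (String × List Int) :=
  let d := PySem.Dict.ofList syn_tagsd
  if d.items = [] then []
  else
    (PySem.List.sorted2 d.items (fun tv => PySem.Str.len tv.1) (fun tv => tv.1) true).foldl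
      (fun retn x =>
        let look := x.1 ++ "."
        if retn.any (fun r => PySem.Str.startswith r.1 look) then retn
        else retn ++ [(x.1, x.2)])
      []

-- ===== PORT B =====
def leaf_tags_py_alt (syn_tagsd : List (String × List Int)) : List (String × List Int) :=
  let d := PySem.Dict.ofList syn_tagsd
  let keys := d.keys
  let leaves := d.items.filter
      (fun tv => !(keys.any (fun r => PySem.Str.startswith r (tv.1 ++ "."))))
  PySem.List.sorted2 leaves (fun tv => PySem.Str.len tv.1) (fun tv => tv.1) true

-- ===== PRECONDITION & SPEC =====
def Spec_leaf_tags_py (syn_tagsd : List (String × List Int)) (out : List (String × List Int)) : Prop := out = leaf_tags_py_alt syn_tagsd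
instance (syn_tagsd : List (String × List Int)) (out : List (String × List Int)) : Decidable (Spec_leaf_tags_py syn_tagsd out) := by unfold Spec_leaf_tags_py; infer_instance

-- ===== CLAIM (what is proved, stated in full; the proofs are below) =====
def Claim_equal_leaf_tags_py : Prop := ∀ (syn_tagsd : List (String × List Int)), Dom_leaf_tags_py syn_tagsd → Spec_leaf_tags_py syn_tagsd (leaf_tags_py syn_tagsd)

-- ===== LEMMAS AND PROOFS =====

-- the sort key of A's decorated triples / B's final sort, as a lexicographic pair
def pvKey (tv : String × List Int) : Lex (Int × String) := toLex (PySem.Str.len tv.1, tv.1)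

-- `r` extends the tag `t` through a '.' boundary
def pvExt (t r : String × List Int) : Bool := PySem.Str.startswith r.1 (t.1 ++ ".")

-- some tag of `items` extends `t`
def pvHasExt (items : List (String × List Int)) (t : String × List Int) : Bool :=
  items.any (fun r => pvExt t r)

lemma sw_prefix {s p : String} :
    PySem.Str.startswith s p = true ↔ p.toList <+: s.toList := by
  rw [PySem.Str.startswith_eq, PySem.Chars.startswith_iff]

lemma sw_dot_prefix {t r : String} (h : PySem.Str.startswith r (t ++ ".") = true) :
    t.toList ++ ['.'] <+: r.toList := by
  have := sw_prefix.mp h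
  rwa [String.toList_append, show String.toList "." = ['.'] from rfl] at this

lemma sw_len {t r : String} (h : PySem.Str.startswith r (t ++ ".") = true) :
    t.length < r.length := by
  have hp := (sw_dot_prefix h).length_le
  simp at hp; omega

lemma sw_trans {a b c : String}
    (h1 : PySem.Str.startswith b (a ++ ".") = true)
    (h2 : PySem.Str.startswith c (b ++ ".") = true) :
    PySem.Str.startswith c (a ++ ".") = true := by
  have p1 := sw_dot_prefix h1
  have p2 := sw_dot_prefix h2
  rw [PySem.Str.startswith_eq, PySem.Chars.startswith_iff, String.toList_append,
    show String.toList "." = ['.'] from rfl]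
  exact (p1.trans (List.prefix_append b.toList ['.'])).trans p2

lemma key_lt_of_ext {x r : String × List Int} (h : pvExt x r = true) : pvKey x < pvKey r := by
  unfold pvExt at h
  have hlen := sw_len h
  unfold pvKey
  rw [Prod.Lex.lt_iff]
  left
  simp [PySem.Str.len_eq]
  exact_mod_cast hlen

lemma ext_irrefl (x : String × List Int) : pvExt x x = false := by
  by_contra h
  have h' : pvExt x x = true := by revert h; cases pvExt x x <;> simp
  exact absurd (sw_len h') (lt_irrefl _)

lemma exists_max_len : ∀ (l : List (String × List Int)), l ≠ [] →
    ∃ m ∈ l, ∀ y ∈ l, y.1.length ≤ m.1.length := by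
  intro l
  induction l with
  | nil => intro h; exact absurd rfl h
  | cons x t ih =>
    intro _
    rcases eq_or_ne t [] with rfl | ht
    · exact ⟨x, by simp⟩
    · obtain ⟨m, hm, hmax⟩ := ih ht
      rcases le_total (m.1.length) (x.1.length) with hle | hle
      · exact ⟨x, by simp, by
          intro y hy
          rcases List.mem_cons.mp hy with rfl | hy'
          · exact le_refl _
          · exact (hmax y hy').trans hle⟩
      · exact ⟨m, List.mem_cons_of_mem _ hm, by
          intro y hy
          rcases List.mem_cons.mp hy with rfl | hy'
          · exact hle
          · exact hmax y hy'⟩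

-- A's scan over a strictly key-descending list keeps exactly the tags no tag of `items` extends.
lemma scan_aux (items : List (String × List Int)) :
    ∀ (S acc : List (String × List Int)),
      S.Pairwise (fun a b => pvKey b < pvKey a) →
      (∀ y ∈ S, y ∈ items) →
      (∀ r ∈ acc, r ∈ items) →
      (∀ y ∈ S, ∀ r ∈ items, pvExt y r = true → pvHasExt items r = false → r ∈ acc ∨ r ∈ S) →
      S.foldl
        (fun retn x =>
          let look := x.1 ++ "."
          if retn.any (fun r => PySem.Str.startswith r.1 look) then retn
          else retn ++ [(x.1, x.2)])
        acc
      = acc ++ S.filter (fun tv => !(pvHasExt items tv)) := by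
  intro S
  induction S with
  | nil => intro acc _ _ _ _; simp
  | cons x S' ih =>
    intro acc hpw hsub haccsub hinv
    have hx_mem : x ∈ items := hsub x (List.mem_cons_self ..)
    have hbranch : (acc.any (fun r => PySem.Str.startswith r.1 (x.1 ++ "."))) = pvHasExt items x := by
      by_cases hpos : pvHasExt items x = true
      · rw [hpos]
        obtain ⟨r0, hr0i, hr0e⟩ := List.any_eq_true.mp hpos
        have hl0 : r0 ∈ items.filter (fun r => pvExt x r) := List.mem_filter.mpr ⟨hr0i, hr0e⟩
        obtain ⟨m, hm, hmax⟩ := exists_max_len _ (List.ne_nil_of_mem hl0)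
        have hmi : m ∈ items := (List.mem_filter.mp hm).1
        have hme : pvExt x m = true := (List.mem_filter.mp hm).2
        have hmleaf : pvHasExt items m = false := by
          by_contra hmh
          have hmh' : pvHasExt items m = true := by revert hmh; cases pvHasExt items m <;> simp
          obtain ⟨r', hr'i, hr'e⟩ := List.any_eq_true.mp hmh'
          have hr'x : pvExt x r' = true := sw_trans hme hr'e
          have := hmax r' (List.mem_filter.mpr ⟨hr'i, hr'x⟩)
          exact absurd (sw_len hr'e) (not_lt.mpr this)
        rcases hinv x (List.mem_cons_self ..) m hmi hme hmleaf with hacc | hS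
        · exact List.any_eq_true.mpr ⟨m, hacc, hme⟩
        · rcases List.mem_cons.mp hS with rfl | hS'
          · rw [ext_irrefl] at hme; exact absurd hme (by simp)
          · have h1 : pvKey m < pvKey x := (List.pairwise_cons.mp hpw).1 m hS'
            have h2 : pvKey x < pvKey m := key_lt_of_ext hme
            exact absurd h2 (not_lt.mpr h1.le)
      · have hneg : pvHasExt items x = false := by revert hpos; cases pvHasExt items x <;> simp
        rw [hneg]
        apply List.any_eq_false.mpr
        intro r hr hsw
        have : pvHasExt items x = true := List.any_eq_true.mpr ⟨r, haccsub r hr, hsw⟩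
        rw [this] at hneg; exact absurd hneg (by simp)
    rw [List.foldl_cons]
    show List.foldl _
        (if acc.any (fun r => PySem.Str.startswith r.1 (x.1 ++ ".")) then acc else acc ++ [(x.1, x.2)]) S'
      = acc ++ List.filter _ (x :: S')
    rw [hbranch, List.filter_cons]
    cases hcase : pvHasExt items x with
    | true =>
      simp only [Bool.not_true, if_neg (by simp : ¬ (false = true))]
      exact ih acc (List.pairwise_cons.mp hpw).2
        (fun y hy => hsub y (List.mem_cons_of_mem _ hy))
        haccsub
        (by
          intro y hy r hri hext hleaf
          rcases hinv y (List.mem_cons_of_mem _ hy) r hri hext hleaf with hacc | hS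
          · exact Or.inl hacc
          · rcases List.mem_cons.mp hS with rfl | hS'
            · rw [hleaf] at hcase; exact absurd hcase (by simp)
            · exact Or.inr hS')
    | false =>
      simp only [if_neg (by simp : ¬ (false = true)), Bool.not_false]
      rw [ih (acc ++ [(x.1, x.2)]) (List.pairwise_cons.mp hpw).2
        (fun y hy => hsub y (List.mem_cons_of_mem _ hy))
        (by
          intro r hr
          rcases List.mem_append.mp hr with h | h
          · exact haccsub r h
          · rcases List.mem_singleton.mp h with rfl
            exact hx_mem)
        (by
          intro y hy r hri hext hleaf
          rcases hinv y (List.mem_cons_of_mem _ hy) r hri hext hleaf with hacc | hS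
          · exact Or.inl (List.mem_append.mpr (Or.inl hacc))
          · rcases List.mem_cons.mp hS with rfl | hS'
            · exact Or.inl (List.mem_append.mpr (Or.inr (by simp)))
            · exact Or.inr hS')]
      simp

lemma sorted2_eq_sorted_pvKey (xs : List (String × List Int)) (rev : Bool) :
    PySem.List.sorted2 xs (fun tv => PySem.Str.len tv.1) (fun tv => tv.1) rev
      = PySem.List.sorted xs pvKey rev := by
  have key_congr : ∀ (b1 b2 : (String × List Int) → (String × List Int) → Bool), b1 = b2 →
      List.foldl (fun acc x => PySem.List.insertBy b1 x acc) ([] : List (String × List Int)) xs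
        = List.foldl (fun acc x => PySem.List.insertBy b2 x acc) [] xs := by
    intro b1 b2 h; rw [h]
  have hbef : (fun (a b : String × List Int) =>
        decide (PySem.Str.len a.1 < PySem.Str.len b.1) ||
          (!decide (PySem.Str.len b.1 < PySem.Str.len a.1) && decide (a.1 < b.1)))
      = fun a b => decide (pvKey a < pvKey b) := by
    funext a b
    rcases Nat.lt_trichotomy a.1.length b.1.length with h | h | h
    · simp [pvKey, Prod.Lex.lt_iff, h]
    · simp [pvKey, Prod.Lex.lt_iff, h]
    · simp [pvKey, Prod.Lex.lt_iff, h, lt_asymm h, h.ne']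
  have hbefr : (fun (a b : String × List Int) =>
        decide (PySem.Str.len b.1 < PySem.Str.len a.1) ||
          (!decide (PySem.Str.len a.1 < PySem.Str.len b.1) && decide (b.1 < a.1)))
      = fun a b => decide (pvKey b < pvKey a) := by
    funext a b
    exact congrFun (congrFun hbef b) a
  cases rev
  · exact key_congr _ _ hbef
  · exact key_congr _ _ hbefr

theorem leaf_tags_py_spec : Claim_equal_leaf_tags_py := by
  intro syn_tagsd _
  unfold Spec_leaf_tags_py leaf_tags_py leaf_tags_py_alt
  simp only []
  set d := PySem.Dict.ofList syn_tagsd with hd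
  set items := d.items with hitems
  have hnd : (items.map Prod.fst).Nodup := by
    have := PySem.Dict.nodup_keys_ofList (κ := String) (ν := List Int) syn_tagsd
    simpa [PySem.Dict.keys, ← hd, ← hitems] using this
  have hfeq : (fun tv : String × List Int =>
        !(d.keys.any (fun r => PySem.Str.startswith r (tv.1 ++ ".")))) =
      (fun tv => !(pvHasExt items tv)) := by
    funext tv
    have : d.keys = items.map Prod.fst := by simp [PySem.Dict.keys, hitems]
    rw [this, List.any_map]
    rfl
  rw [hfeq]
  by_cases hemp : items = []
  · rw [if_pos hemp, hemp, List.filter_nil]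
    rfl
  · rw [if_neg hemp]
    rw [sorted2_eq_sorted_pvKey, sorted2_eq_sorted_pvKey]
    set S := PySem.List.sorted items pvKey true with hS
    have hperm : S.Perm items := PySem.List.sorted_perm items pvKey true
    have hple : S.Pairwise (fun a b => pvKey b ≤ pvKey a) :=
      PySem.List.sorted_pairwise_rev items pvKey
    have hSnd : (S.map Prod.fst).Nodup :=
      ((hperm.map Prod.fst).nodup_iff).mpr hnd
    have hne : S.Pairwise (fun a b : String × List Int => a.1 ≠ b.1) :=
      List.pairwise_map.mp hSnd
    have hpw : S.Pairwise (fun a b => pvKey b < pvKey a) := by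
      have hand := List.Pairwise.and hple hne
      exact hand.imp (by
        rintro a b ⟨hle, hnab⟩
        apply lt_of_le_of_ne hle
        intro hkeq
        apply hnab
        have : (PySem.Str.len b.1, b.1) = (PySem.Str.len a.1, a.1) := by
          have := congrArg ofLex hkeq
          simpa [pvKey] using this
        exact (congrArg Prod.snd this).symm)
    have hA : S.foldl
        (fun retn x =>
          let look := x.1 ++ "."
          if retn.any (fun r => PySem.Str.startswith r.1 look) then retn
          else retn ++ [(x.1, x.2)])
        []
      = [] ++ S.filter (fun tv => !(pvHasExt items tv)) :=
      scan_aux items S []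
        hpw
        (fun y hy => hperm.subset hy)
        (fun r hr => absurd hr (List.not_mem_nil))
        (fun y _ r hri _ _ => Or.inr (hperm.mem_iff.mpr hri))
    rw [hA, List.nil_append]
    exact (PySem.List.sorted_rev_eq_of_perm_of_pairwise_gt
      (items.filter (fun tv => !(pvHasExt items tv)))
      (S.filter (fun tv => !(pvHasExt items tv)))
      pvKey
      (hperm.filter _)
      (hpw.filter _)).symm
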